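-- pv_equiv track=rewrite | github.com/balmasi/autobloggy | src/autobloggy/checks.py | code_fence_language_failures
-- ===== SOURCE A (Python) =====
-- def code_fence_language_failures(text: str) -> int:
--     failures = 0
--     in_fence = False
--     for line in text.splitlines():
--         if not line.startswith("```"):
--             continue
--         if in_fence:
--             in_fence = False
--         else:
--             in_fence = True
--             if line.strip() == "```":
--                 failures += 1
--     return failures
-- ===== SOURCE B (Python) =====
-- def code_fence_language_failures(text: str) -> int:
--     # Block-structured scan: find an opening fence, judge it, then skip the
--     # whole fenced block (everything up to and including the closing fence).
--     lines = text.splitlines()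
--     n = len(lines)
--     failures = 0
--     i = 0
--     while i < n:
--         if lines[i].startswith("```"):
--             if lines[i].strip() == "```":
--                 failures += 1
--             i += 1
--             while i < n and not lines[i].startswith("```"):
--                 i += 1
--         i += 1
--     return failures
-- ===== Notes on version B (the rewrite author's own statement) =====
-- stated objective: alternative
-- what changed: Replaces the in_fence boolean toggle with a block-structured scan: an outer loop locates each opening fence and judges it, and an inner scan skips the entire fenced block past its closing fence before resuming.
import Mathlib
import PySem

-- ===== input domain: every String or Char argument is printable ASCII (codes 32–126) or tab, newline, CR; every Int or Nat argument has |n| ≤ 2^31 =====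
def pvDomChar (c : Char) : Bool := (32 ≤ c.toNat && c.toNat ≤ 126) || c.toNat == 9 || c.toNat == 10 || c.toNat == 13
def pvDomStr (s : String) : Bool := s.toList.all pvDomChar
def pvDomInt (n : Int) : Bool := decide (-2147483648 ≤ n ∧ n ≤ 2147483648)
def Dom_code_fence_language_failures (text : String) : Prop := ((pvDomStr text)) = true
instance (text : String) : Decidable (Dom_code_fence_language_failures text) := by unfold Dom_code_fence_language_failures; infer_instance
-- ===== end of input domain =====

-- B replaces A's in_fence toggle by a block-structured scan: the outer loop finds an opening fence and judges it, an inner scan then skips the whole fenced block past its closer; same O(n) cost, an alternative traversal.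


-- ===== PORT A =====
-- loop body of A's single for-loop, named so the proofs can cite it
def stepA : Int × Bool → String → Int × Bool := fun st line =>
  if ¬ (PySem.Str.startswith line "```" = true) then st
  else if st.2 then (st.1, false)
  else ((if PySem.Str.strip line == "```" then st.1 + 1 else st.1), true)

def code_fence_language_failures (text : String) : Int :=
  ((PySem.Str.splitlines text).foldl stepA ((0 : Int), false)).1

-- ===== PORT B =====
-- B's inner `while i < n and not lines[i].startswith("```"): i += 1` followed by `i += 1`
-- is the index form of "drop the lines up to (and including) the closing fence":
def pvSkipBlock (ls : List String) : List String :=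
  (ls.dropWhile (fun x => !(PySem.Str.startswith x "```"))).drop 1

theorem pvSkipBlock_len (ls : List String) : (pvSkipBlock ls).length ≤ ls.length := by
  have h := (List.dropWhile_sublist (l := ls) (p := fun x => !(PySem.Str.startswith x "```"))).length_le
  simp only [pvSkipBlock, List.length_drop]
  omega

-- B's outer while loop over the remaining lines
def pvCountFences : List String → Int
  | [] => 0
  | l :: ls =>
    if PySem.Str.startswith l "```" then
      (if PySem.Str.strip l == "```" then 1 else 0) + pvCountFences (pvSkipBlock ls)
    else pvCountFences ls
termination_by ls => ls.length
decreasing_by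
  · have := pvSkipBlock_len ls; simp; omega
  · simp

def code_fence_language_failures_alt (text : String) : Int :=
  pvCountFences (PySem.Str.splitlines text)

-- ===== PRECONDITION & SPEC =====
def Spec_code_fence_language_failures (text : String) (out : Int) : Prop := out = code_fence_language_failures_alt text
instance (text : String) (out : Int) : Decidable (Spec_code_fence_language_failures text out) := by unfold Spec_code_fence_language_failures; infer_instance

-- ===== CLAIM (what is proved, stated in full; the proofs are below) =====
def Claim_equal_code_fence_language_failures : Prop := ∀ (text : String), Dom_code_fence_language_failures text → Spec_code_fence_language_failures text (code_fence_language_failures text)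

-- ===== LEMMAS AND PROOFS =====

-- A's fold, started out of a fence, counts like B's block recursion; started inside a
-- fence, it first skips to (and past) the closing fence.
theorem foldA_both (ls : List String) :
    (∀ f : Int, (ls.foldl stepA (f, false)).1 = f + pvCountFences ls) ∧
    (∀ f : Int, (ls.foldl stepA (f, true)).1 = f + pvCountFences (pvSkipBlock ls)) := by
  induction ls with
  | nil =>
    constructor <;> intro f <;> simp [pvCountFences, pvSkipBlock]
  | cons l ls ih =>
    obtain ⟨ih0, ih1⟩ := ih
    constructor
    · intro f
      simp only [List.foldl_cons, stepA]
      by_cases hp : PySem.Str.startswith l "```" = true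
      · rw [if_neg (not_not_intro hp)]
        simp only [Bool.false_eq_true, if_false]
        rw [ih1, pvCountFences, if_pos hp]
        by_cases hs : (PySem.Str.strip l == "```") = true <;> simp [hs] <;> ring
      · rw [if_pos hp, ih0, pvCountFences, if_neg hp]
    · intro f
      simp only [List.foldl_cons, stepA]
      by_cases hp : PySem.Str.startswith l "```" = true
      · rw [if_neg (not_not_intro hp)]
        simp only [if_pos]
        rw [ih0]
        have hnot : (!(PySem.Str.startswith l "```")) = false := by rw [hp]; rfl
        simp only [pvSkipBlock]
        rw [List.dropWhile_cons, hnot]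
        simp
      · rw [if_pos hp, ih1]
        have hp' : PySem.Str.startswith l "```" = false := by
          exact Bool.eq_false_iff.mpr hp
        have hnot : (!(PySem.Str.startswith l "```")) = true := by rw [hp']; rfl
        simp only [pvSkipBlock]
        rw [List.dropWhile_cons, hnot]
        simp

-- ===== VERDICT (by name: the statement is the Claim_ definition above) =====
theorem code_fence_language_failures_spec : Claim_equal_code_fence_language_failures := by
  intro text _
  unfold Spec_code_fence_language_failures code_fence_language_failures code_fence_language_failures_alt
  rw [(foldA_both (PySem.Str.splitlines text)).1 0]
  simp
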